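-- pv_equiv track=rewrite | github.com/pypi-data/pypi-mirror-94 | packages/mwgencode/mwgencode-1.2.25.tar.gz/mwgencode-1.2.25/gencode/utils.py | get_merge_codes
-- ===== SOURCE A (Python) =====
-- def get_merge_codes(scodes,dcodes):
--     # scodes :新产生的代码集合，dcodes：需更新的代码集合
--     isexist = False
--     if not scodes:
--         return
--     # 記錄丟失的屬於方法的代碼
--     pass_code = []
--     for sindx,sc in enumerate(scodes,0):
--         if sc.startswith('from '):
--             continue
--         if sc.startswith('@'):
--             pass_code.append(sc)
--             continue
--         # isexist = False
--         if sc.startswith('def '):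
--             isexist = False
--             c_func = sc.split('(')[0]+'('
--             for dindex,dc in enumerate(dcodes,0):
--                 if dc.startswith(c_func):
--                     dcodes[dindex] = scodes[sindx]
--                     isexist = True
--                     pass_code.clear()
--                     break
--             else:
--                 dcodes.extend(pass_code)
--                 dcodes.append(scodes[sindx])
--                 pass_code.clear()
--         elif not isexist:
--             dcodes.append(scodes[sindx])
--
--     return dcodes
-- ===== SOURCE B (Python) =====
-- def get_merge_codes(scodes, dcodes):
--     # Same merge, but done with a hash index instead of an inner linear scan of dcodes
--     # (key -> ordered list of matching positions) built once and maintained on the fly.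
--     # Mutates and returns dcodes, like the original.
--     if not scodes:
--         return
--
--     def key_of(line):
--         return line.split('(', 1)[0] + '('
--
--     index = {}
--
--     def register(line, pos):
--         if '(' in line:
--             index.setdefault(key_of(line), []).append(pos)
--
--     for i, dc in enumerate(dcodes):
--         register(dc, i)
--
--     def add(line):
--         register(line, len(dcodes))
--         dcodes.append(line)
--
--     pending = []
--     isexist = False
--     for sc in scodes:
--         if sc.startswith('from '):
--             continue
--         if sc.startswith('@'):
--             pending.append(sc)
--             continue
--         if sc.startswith('def '):
--             c_func = key_of(sc)
--             hits = index.get(c_func)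
--             if hits:
--                 isexist = True
--                 j = hits[0]
--                 dcodes[j] = sc
--                 if '(' not in sc:
--                     hits.pop(0)  # replaced entry no longer carries this key
--             else:
--                 isexist = False
--                 for p in pending:
--                     add(p)
--                 add(sc)
--             pending = []
--         elif not isexist:
--             add(sc)
--     return dcodes
-- ===== Notes on version B (the rewrite author's own statement) =====
-- stated objective: alternative
-- what changed: The inner linear rescan of dcodes per 'def' line is replaced by a hash index from 'name(' key to the ordered list of matching positions, built once over dcodes and maintained across replacements and appends.
import Mathlib
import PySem

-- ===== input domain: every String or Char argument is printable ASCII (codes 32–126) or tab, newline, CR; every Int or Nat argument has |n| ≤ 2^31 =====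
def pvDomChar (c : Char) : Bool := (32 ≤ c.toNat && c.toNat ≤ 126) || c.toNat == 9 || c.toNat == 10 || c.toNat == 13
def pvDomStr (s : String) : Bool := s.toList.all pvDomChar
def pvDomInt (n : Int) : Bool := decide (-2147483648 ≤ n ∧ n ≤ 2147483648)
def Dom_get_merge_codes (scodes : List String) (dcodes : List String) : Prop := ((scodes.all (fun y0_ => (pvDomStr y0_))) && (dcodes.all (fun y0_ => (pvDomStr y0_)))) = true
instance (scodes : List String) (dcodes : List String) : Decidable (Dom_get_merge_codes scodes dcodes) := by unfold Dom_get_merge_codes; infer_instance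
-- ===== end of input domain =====

-- B replaces A's inner linear rescan of dcodes per 'def' line by a hash index (key -> ordered
-- list of matching positions) built once and maintained on the fly (an alternative algorithm);
-- A mutates dcodes in place in Python, the equivalence proved here is about the return value only.

-- ===== PORT A =====
-- sc.split('(')[0] + '(' : the prefix of sc before its first '(' (whole string if '(' absent),
-- with '(' appended — exact rendering of the Python expression, over List Char.
def pvCfunc (s : String) : List Char := s.toList.takeWhile (fun c => c != '(') ++ ['(']

-- the inner 'for dindex, dc in enumerate(dcodes, 0): if dc.startswith(c_func): …' scan:
-- first index whose entry starts with c_func (none = the for-else branch)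
def pvFindA (cfunc : List Char) (dcodes : List String) (i : Nat) : Option Nat :=
  match dcodes with
  | [] => none
  | dc :: rest =>
      if PySem.Chars.startswith dc.toList cfunc then some i else pvFindA cfunc rest (i + 1)

-- loop body of A; state = (dcodes, pass_code, isexist)
def pvStepA (st : List String × List String × Bool) (sc : String) :
    List String × List String × Bool :=
  if PySem.Chars.startswith sc.toList "from ".toList then st
  else if PySem.Chars.startswith sc.toList "@".toList then (st.1, st.2.1 ++ [sc], st.2.2)
  else if PySem.Chars.startswith sc.toList "def ".toList then
    match pvFindA (pvCfunc sc) st.1 0 with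
    | some j => (st.1.set j sc, [], true)            -- dcodes[dindex] = scodes[sindx]; pass_code.clear()
    | none => (st.1 ++ st.2.1 ++ [sc], [], false)    -- for-else: extend pass_code, append sc
  else if st.2.2 = false then (st.1 ++ [sc], st.2.1, st.2.2)
  else st

def get_merge_codes (scodes : List String) (dcodes : List String) : Option (List String) :=
  if scodes = [] then none
  else some ((scodes.foldl pvStepA (dcodes, [], false)).1)

-- ===== PORT B =====
-- key_of(line) = line.split('(', 1)[0] + '(' : prefix before the first '(' plus '(' — exact
def pvKeyOf (s : String) : List Char := s.toList.takeWhile (fun c => c != '(') ++ ['(']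

-- '(' in line : membership of the single character '(' — exact
def pvHasParen (s : String) : Bool := s.toList.contains '('

-- register(line, pos): index.setdefault(key_of(line), []).append(pos) when '(' in line
def pvIdxAdd (idx : PySem.Dict (List Char) (List Int)) (line : String) (pos : Int) :
    PySem.Dict (List Char) (List Int) :=
  if pvHasParen line then idx.modify (pvKeyOf line) [] (fun l => l ++ [pos]) else idx

-- for i, dc in enumerate(dcodes): register(dc, i)
def pvBuildIdx (dcodes : List String) : PySem.Dict (List Char) (List Int) :=
  (PySem.List.enumerate dcodes 0).foldl (fun idx p => pvIdxAdd idx p.2 p.1) PySem.Dict.empty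

-- add(line): register(line, len(dcodes)); dcodes.append(line)
def pvAddLine (st : List String × PySem.Dict (List Char) (List Int)) (line : String) :
    List String × PySem.Dict (List Char) (List Int) :=
  (st.1 ++ [line], pvIdxAdd st.2 line (st.1.length : Int))

-- loop body of B; state = (dcodes, index, pending, isexist); dcodes[j] = sc is set at j.toNat
-- (the index only ever stores in-range nonnegative positions, so this is exact)
def pvStepB (st : List String × PySem.Dict (List Char) (List Int) × List String × Bool)
    (sc : String) : List String × PySem.Dict (List Char) (List Int) × List String × Bool :=
  if PySem.Chars.startswith sc.toList "from ".toList then st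
  else if PySem.Chars.startswith sc.toList "@".toList then (st.1, st.2.1, st.2.2.1 ++ [sc], st.2.2.2)
  else if PySem.Chars.startswith sc.toList "def ".toList then
    match st.2.1.getD (pvKeyOf sc) [] with
    | j :: rest =>
        (st.1.set j.toNat sc,
         (if pvHasParen sc then st.2.1 else st.2.1.insert (pvKeyOf sc) rest), [], true)
    | [] =>
        let di := (st.2.2.1 ++ [sc]).foldl pvAddLine (st.1, st.2.1)
        (di.1, di.2, [], false)
  else if st.2.2.2 = false then (st.1 ++ [sc], pvIdxAdd st.2.1 sc (st.1.length : Int), st.2.2.1, st.2.2.2)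
  else st

def get_merge_codes_alt (scodes : List String) (dcodes : List String) : Option (List String) :=
  if scodes.isEmpty then none
  else some ((scodes.foldl pvStepB (dcodes, pvBuildIdx dcodes, [], false)).1)

-- ===== PRECONDITION & SPEC =====
def Spec_get_merge_codes (scodes : List String) (dcodes : List String) (out : Option (List String)) : Prop := out = get_merge_codes_alt scodes dcodes
instance (scodes : List String) (dcodes : List String) (out : Option (List String)) : Decidable (Spec_get_merge_codes scodes dcodes out) := by unfold Spec_get_merge_codes; infer_instance

-- ===== CLAIM (what is proved, stated in full; the proofs are below) =====
def Claim_equal_get_merge_codes : Prop := ∀ (scodes : List String) (dcodes : List String), Dom_get_merge_codes scodes dcodes → Spec_get_merge_codes scodes dcodes (get_merge_codes scodes dcodes)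

-- ===== LEMMAS AND PROOFS =====

lemma pvKeyOf_eq_cfunc (s : String) : pvKeyOf s = pvCfunc s := rfl

-- a line matches key k (as tested by the index) iff it contains '(' and its key is k
def pvKM (dc : String) (k : List Char) : Bool := pvHasParen dc && (pvCfunc dc == k)

-- the list of positions (counted from s) of lines of d matching key k
def pvSpecIdx (d : List String) (k : List Char) (s : Int) : List Int :=
  ((PySem.List.enumerate d s).filter (fun p => pvKM p.2 k)).map (fun p => p.1)

lemma pv_paren_not_mem_take (s : String) :
    '(' ∉ s.toList.takeWhile (fun c => c != '(') := by
  intro h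
  have := List.mem_takeWhile_imp h
  simp at this

-- dc.startswith(c_func) ⟺ '(' ∈ dc ∧ key(dc) = c_func
lemma pv_prefix_paren_iff (l p : List Char) (hp : '(' ∉ p) :
    (p ++ ['(']) <+: l ↔ ('(' ∈ l ∧ l.takeWhile (fun c => c != '(') = p) := by
  induction l generalizing p with
  | nil => simp
  | cons c cs ih =>
      by_cases hc : c = '('
      · subst hc
        cases p with
        | nil => simp
        | cons q p' =>
            have hq : q ≠ '(' := by intro h; exact hp (by simp [h])
            simp [List.cons_prefix_cons, hq]
      · cases p with
        | nil =>
            simp [List.cons_prefix_cons, hc, Ne.symm hc]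
        | cons q p' =>
            have hp' : '(' ∉ p' := fun h => hp (by simp [h])
            simp only [List.cons_append, List.cons_prefix_cons, List.mem_cons,
              List.takeWhile_cons, ih p' hp']
            by_cases hcq : c = q
            · subst hcq
              constructor
              · rintro ⟨-, hm, ht⟩
                exact ⟨Or.inr hm, by simp [hc, ht]⟩
              · rintro ⟨hm, ht⟩
                simp only [show (c != '(') = true by simp [hc], if_true] at ht
                have := (List.cons.injEq _ _ _ _).mp ht
                refine ⟨rfl, ?_, this.2⟩
                rcases hm with h | h
                · exact absurd h (fun hh => hc hh.symm)
                · exact h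
            · constructor
              · rintro ⟨h, -⟩; exact absurd h (fun hh => hcq hh.symm)
              · rintro ⟨-, ht⟩
                simp only [show (c != '(') = true by simp [hc], if_true] at ht
                have := (List.cons.injEq _ _ _ _).mp ht
                exact absurd this.1 hcq

lemma pv_sw_iff (dc sc : String) :
    PySem.Chars.startswith dc.toList (pvCfunc sc) = pvKM dc (pvCfunc sc) := by
  rw [Bool.eq_iff_iff, PySem.Chars.startswith_iff]
  conv_lhs => rw [pvCfunc]
  rw [pv_prefix_paren_iff _ _ (pv_paren_not_mem_take sc)]
  simp [pvKM, pvHasParen, pvCfunc]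

lemma pv_findA_eq (sc : String) (d : List String) (i : Nat) :
    pvFindA (pvCfunc sc) d i = ((pvSpecIdx d (pvCfunc sc) (i : Int)).head?).map Int.toNat := by
  induction d generalizing i with
  | nil => simp [pvFindA, pvSpecIdx, PySem.List.enumerate_nil]
  | cons dc rest ih =>
      rw [pvFindA, pv_sw_iff]
      cases hkm : pvKM dc (pvCfunc sc) with
      | true =>
          simp [pvSpecIdx, PySem.List.enumerate_cons, hkm]
      | false =>
          rw [if_neg (by simp)]
          rw [ih (i + 1)]
          simp only [pvSpecIdx, PySem.List.enumerate_cons, List.filter_cons, hkm,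
            Bool.false_eq_true, if_false]
          norm_cast

lemma pv_specIdx_append (d : List String) (x : String) (k : List Char) :
    pvSpecIdx (d ++ [x]) k 0 = pvSpecIdx d k 0 ++ (if pvKM x k then [(d.length : Int)] else []) := by
  simp only [pvSpecIdx, PySem.List.enumerate_append, List.filter_append, List.map_append]
  congr 1
  simp only [PySem.List.enumerate_cons, PySem.List.enumerate_nil, List.filter_cons,
    List.filter_nil, zero_add]
  cases pvKM x k <;> simp

lemma pv_inv_add (idx : PySem.Dict (List Char) (List Int)) (d : List String) (x : String)
    (h : ∀ k, idx.getD k [] = pvSpecIdx d k 0) :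
    ∀ k, (pvIdxAdd idx x (d.length : Int)).getD k [] = pvSpecIdx (d ++ [x]) k 0 := by
  intro k
  rw [pv_specIdx_append]
  unfold pvIdxAdd
  rw [pvKeyOf_eq_cfunc]
  cases hpx : pvHasParen x with
  | false => simp [h k, pvKM, hpx]
  | true =>
      rw [if_pos rfl, PySem.Dict.getD_modify]
      by_cases hk : k = pvCfunc x
      · subst hk
        simp [h _, pvKM, hpx]
      · rw [if_neg hk, h k, if_neg (by simp [pvKM, hpx]; intro h'; exact absurd h'.symm hk)]
        simp

lemma pv_addAll (l : List String) :
    ∀ (d : List String) (idx : PySem.Dict (List Char) (List Int)),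
      (∀ k, idx.getD k [] = pvSpecIdx d k 0) →
      (l.foldl pvAddLine (d, idx)).1 = d ++ l ∧
      (∀ k, (l.foldl pvAddLine (d, idx)).2.getD k [] = pvSpecIdx (d ++ l) k 0) := by
  induction l with
  | nil => intro d idx h; simpa using h
  | cons x l ih =>
      intro d idx h
      have h' := pv_inv_add idx d x h
      have := ih (d ++ [x]) (pvIdxAdd idx x (d.length : Int)) h'
      simpa [pvAddLine, List.append_assoc] using this

lemma pv_spec_mem_ge (d : List String) (k : List Char) :
    ∀ (s j : Int), j ∈ pvSpecIdx d k s → s ≤ j := by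
  induction d with
  | nil => intro s j hj; simp [pvSpecIdx, PySem.List.enumerate_nil] at hj
  | cons x d ih =>
      intro s j hj
      simp only [pvSpecIdx, PySem.List.enumerate_cons, List.filter_cons] at hj
      by_cases hx : pvKM x k = true
      · rw [if_pos hx] at hj
        simp only [List.map_cons, List.mem_cons] at hj
        rcases hj with h | h
        · omega
        · have := ih (s + 1) j (by simpa [pvSpecIdx] using h)
          omega
      · rw [if_neg hx] at hj
        have := ih (s + 1) j (by simpa [pvSpecIdx] using hj)
        omega

lemma pv_spec_set_paren (sc : String) (hp : pvHasParen sc = true) (d : List String) :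
    ∀ (s j : Int) (rest : List Int), pvSpecIdx d (pvCfunc sc) s = j :: rest →
      ∀ k, pvSpecIdx (d.set (j - s).toNat sc) k s = pvSpecIdx d k s := by
  induction d with
  | nil => intro s j rest h; simp [pvSpecIdx, PySem.List.enumerate_nil] at h
  | cons x d ih =>
      intro s j rest h k
      by_cases hx : pvKM x (pvCfunc sc) = true
      · obtain ⟨hj, -⟩ : s = j ∧ pvSpecIdx d (pvCfunc sc) (s + 1) = rest := by
          simpa [pvSpecIdx, PySem.List.enumerate_cons, List.filter_cons, hx] using h
        have hpx : pvHasParen x = true := by simp [pvKM] at hx; exact hx.1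
        have hcx : pvCfunc x = pvCfunc sc := by simp [pvKM] at hx; exact hx.2
        have hkm : pvKM sc k = pvKM x k := by simp [pvKM, hp, hpx, hcx]
        have hset : (j - s).toNat = 0 := by omega
        rw [hset, List.set_cons_zero]
        simp only [pvSpecIdx, PySem.List.enumerate_cons, List.filter_cons, hkm]
        cases pvKM x k <;> simp
      · have h' : pvSpecIdx d (pvCfunc sc) (s + 1) = j :: rest := by
          simpa [pvSpecIdx, PySem.List.enumerate_cons, List.filter_cons, hx] using h
        have hge : s + 1 ≤ j := pv_spec_mem_ge d _ (s + 1) j (by rw [h']; simp)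
        have hn : (j - s).toNat = (j - (s + 1)).toNat + 1 := by omega
        rw [hn, List.set_cons_succ]
        have hih := ih (s + 1) j rest h' k
        simp only [pvSpecIdx, PySem.List.enumerate_cons, List.filter_cons] at hih ⊢
        cases hxy : pvKM x k <;> simp [hih]

lemma pv_spec_set_noparen (sc : String) (hp : pvHasParen sc = false) (d : List String) :
    ∀ (s j : Int) (rest : List Int), pvSpecIdx d (pvCfunc sc) s = j :: rest →
      ∀ k, pvSpecIdx (d.set (j - s).toNat sc) k s =
        if k = pvCfunc sc then rest else pvSpecIdx d k s := by
  induction d with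
  | nil => intro s j rest h; simp [pvSpecIdx, PySem.List.enumerate_nil] at h
  | cons x d ih =>
      intro s j rest h k
      by_cases hx : pvKM x (pvCfunc sc) = true
      · obtain ⟨hj, hrest⟩ : s = j ∧ pvSpecIdx d (pvCfunc sc) (s + 1) = rest := by
          simpa [pvSpecIdx, PySem.List.enumerate_cons, List.filter_cons, hx] using h
        have hpx : pvHasParen x = true := by simp [pvKM] at hx; exact hx.1
        have hcx : pvCfunc x = pvCfunc sc := by simp [pvKM] at hx; exact hx.2
        have hset : (j - s).toNat = 0 := by omega
        have h1 : pvKM sc k = false := by simp [pvKM, hp]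
        rw [hset, List.set_cons_zero]
        by_cases hk : k = pvCfunc sc
        · rw [hk] at h1
          rw [if_pos hk, ← hrest, hk]
          simp [pvSpecIdx, PySem.List.enumerate_cons, h1]
        · have h2 : pvKM x k = false := by
            rw [pvKM, hcx]
            simp only [Bool.and_eq_false_iff]
            right
            exact beq_eq_false_iff_ne.mpr (fun hh => hk hh.symm)
          rw [if_neg hk]
          simp [pvSpecIdx, PySem.List.enumerate_cons, h1, h2]
      · have h' : pvSpecIdx d (pvCfunc sc) (s + 1) = j :: rest := by
          simpa [pvSpecIdx, PySem.List.enumerate_cons, List.filter_cons, hx] using h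
        have hge : s + 1 ≤ j := pv_spec_mem_ge d _ (s + 1) j (by rw [h']; simp)
        have hn : (j - s).toNat = (j - (s + 1)).toNat + 1 := by omega
        rw [hn, List.set_cons_succ]
        have hih := ih (s + 1) j rest h' k
        by_cases hk : k = pvCfunc sc
        · rw [if_pos hk] at hih ⊢
          have hxk : pvKM x k = false := by rw [hk]; simpa using hx
          simp [pvSpecIdx, PySem.List.enumerate_cons, hxk] at hih ⊢
          exact hih
        · rw [if_neg hk] at hih ⊢
          simp only [pvSpecIdx, PySem.List.enumerate_cons, List.filter_cons] at hih ⊢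
          cases hxy : pvKM x k <;> simp [hih]

lemma pv_inv_build (d : List String) :
    ∀ k, (pvBuildIdx d).getD k [] = pvSpecIdx d k 0 := by
  induction d using List.reverseRecOn with
  | nil => intro k; simp [pvBuildIdx, PySem.List.enumerate_nil, pvSpecIdx]
  | append_singleton d x ih =>
      have : pvBuildIdx (d ++ [x]) = pvIdxAdd (pvBuildIdx d) x (d.length : Int) := by
        rw [pvBuildIdx, pvBuildIdx, PySem.List.enumerate_append, List.foldl_append]
        simp [PySem.List.enumerate_cons, PySem.List.enumerate_nil]
      rw [this]
      exact pv_inv_add _ d x ih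

lemma pv_loop_corr (scodes : List String) :
    ∀ (d : List String) (idx : PySem.Dict (List Char) (List Int)) (p : List String) (e : Bool),
      (∀ k, idx.getD k [] = pvSpecIdx d k 0) →
      (scodes.foldl pvStepA (d, p, e)).1 = (scodes.foldl pvStepB (d, idx, p, e)).1 := by
  induction scodes with
  | nil => intro d idx p e _; rfl
  | cons sc rest ih =>
      intro d idx p e h
      rw [List.foldl_cons, List.foldl_cons]
      by_cases t1 : PySem.Chars.startswith sc.toList ['f', 'r', 'o', 'm', ' '] = true
      · rw [show pvStepA (d, p, e) sc = (d, p, e) from by simp [pvStepA, t1],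
            show pvStepB (d, idx, p, e) sc = (d, idx, p, e) from by simp [pvStepB, t1]]
        exact ih d idx p e h
      · by_cases t2 : PySem.Chars.startswith sc.toList ['@'] = true
        · rw [show pvStepA (d, p, e) sc = (d, p ++ [sc], e) from by simp [pvStepA, t1, t2],
              show pvStepB (d, idx, p, e) sc = (d, idx, p ++ [sc], e) from by
                simp [pvStepB, t1, t2]]
          exact ih d idx (p ++ [sc]) e h
        · by_cases t3 : PySem.Chars.startswith sc.toList ['d', 'e', 'f', ' '] = true
          · rcases hs : pvSpecIdx d (pvCfunc sc) 0 with _ | ⟨j, rs⟩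
            · have hA : pvStepA (d, p, e) sc = (d ++ p ++ [sc], [], false) := by
                simp [pvStepA, t1, t2, t3, pv_findA_eq, hs]
              have hB : pvStepB (d, idx, p, e) sc =
                  (((p ++ [sc]).foldl pvAddLine (d, idx)).1,
                   ((p ++ [sc]).foldl pvAddLine (d, idx)).2, [], false) := by
                simp [pvStepB, t1, t2, t3, h, hs, pvKeyOf_eq_cfunc]
              obtain ⟨h1, h2⟩ := pv_addAll (p ++ [sc]) d idx h
              rw [hA, hB, h1, List.append_assoc]
              exact ih _ _ [] false h2
            · have hfj : pvFindA (pvCfunc sc) d 0 = some j.toNat := by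
                rw [pv_findA_eq sc d 0]
                simp [hs]
              have hA : pvStepA (d, p, e) sc = (d.set j.toNat sc, [], true) := by
                simp [pvStepA, t1, t2, t3, hfj]
              have hB : pvStepB (d, idx, p, e) sc =
                  (d.set j.toNat sc,
                   (if pvHasParen sc then idx else idx.insert (pvCfunc sc) rs), [], true) := by
                rw [show idx.insert (pvCfunc sc) rs = idx.insert (pvKeyOf sc) rs from rfl]
                simp [pvStepB, t1, t2, t3, h, hs, pvKeyOf_eq_cfunc]
              rw [hA, hB]
              apply ih
              intro k
              cases hpp : pvHasParen sc with
              | true =>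
                  have h2 : pvSpecIdx (d.set j.toNat sc) k 0 = pvSpecIdx d k 0 := by
                    simpa using pv_spec_set_paren sc hpp d 0 j rs (by simpa using hs) k
                  simpa [hpp, h2] using h k
              | false =>
                  have h2 : pvSpecIdx (d.set j.toNat sc) k 0 =
                      if k = pvCfunc sc then rs else pvSpecIdx d k 0 := by
                    simpa using pv_spec_set_noparen sc hpp d 0 j rs (by simpa using hs) k
                  rw [if_neg (by simp), PySem.Dict.getD_insert, h2]
                  split_ifs with hk
                  · rfl
                  · exact h k
          · cases e with
            | false =>
                rw [show pvStepA (d, p, false) sc = (d ++ [sc], p, false) from by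
                      simp [pvStepA, t1, t2, t3],
                    show pvStepB (d, idx, p, false) sc =
                        (d ++ [sc], pvIdxAdd idx sc (d.length : Int), p, false) from by
                      simp [pvStepB, t1, t2, t3]]
                exact ih _ _ p false (pv_inv_add idx d sc h)
            | true =>
                rw [show pvStepA (d, p, true) sc = (d, p, true) from by
                      simp [pvStepA, t1, t2, t3],
                    show pvStepB (d, idx, p, true) sc = (d, idx, p, true) from by
                      simp [pvStepB, t1, t2, t3]]
                exact ih d idx p true h

-- ===== VERDICT (by name: the statement is the Claim_ definition above) =====
theorem get_merge_codes_spec : Claim_equal_get_merge_codes := by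
  intro scodes dcodes _
  unfold Spec_get_merge_codes
  cases scodes with
  | nil => rfl
  | cons x xs =>
      simp only [get_merge_codes, get_merge_codes_alt, List.isEmpty_cons,
        reduceCtorEq, Bool.false_eq_true, if_false]
      exact congrArg some (pv_loop_corr (x :: xs) dcodes (pvBuildIdx dcodes) [] false (pv_inv_build dcodes))
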